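-- pv_equiv track=rewrite | github.com/RVDROU/NsiClaveille | files/1_NSI/Activités/1NSI_activite 3_codage des entiers/codes/1_activite3_correction.py | masque_parite
-- ===== SOURCE A (Python) =====
-- def masque_parite(parite, nb) :
--     '''Calcul le masque selon la parité choisie.
--     parametres : parite (entier) -> 0 : masque des leds paires
--                                     1 : masque des leds impaires
--                  nb : nombre de bits
--     '''
--     masque = 0
--     if parite == 0 :
--         debut = 0
--     elif parite == 1 :
--         debut = 1
--     else :
--         return None
--
--     for i in range(debut, 30, 2) :
--         masque = masque + 2**i
--     return masque
-- ===== SOURCE B (Python) =====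
-- def masque_parite(parite, nb):
--     '''Closed-form version: even-position mask (4**15-1)//3, shifted by the parity.'''
--     if parite not in (0, 1):
--         return None
--     return ((4 ** 15 - 1) // 3) << parite
-- ===== Notes on version B (the rewrite author's own statement) =====
-- stated objective: simpler
-- what changed: Replaces the 15-step accumulation loop over range(debut,30,2) with a single closed-form expression: the even-position mask (4**15-1)//3 shifted left by the parity.
import Mathlib
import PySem

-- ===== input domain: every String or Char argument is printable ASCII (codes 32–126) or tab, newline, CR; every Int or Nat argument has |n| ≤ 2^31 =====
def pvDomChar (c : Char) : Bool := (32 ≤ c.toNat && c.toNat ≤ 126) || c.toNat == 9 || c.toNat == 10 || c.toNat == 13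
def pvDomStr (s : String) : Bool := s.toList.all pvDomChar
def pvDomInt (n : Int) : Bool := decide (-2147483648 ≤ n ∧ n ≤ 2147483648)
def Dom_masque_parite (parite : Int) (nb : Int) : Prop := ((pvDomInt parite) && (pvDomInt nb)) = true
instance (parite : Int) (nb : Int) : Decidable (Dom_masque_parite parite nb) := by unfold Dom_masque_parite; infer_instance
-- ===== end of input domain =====

-- ===== PORT A =====
-- Port of A: accumulate masque += 2**i over range(debut, 30, 2).
def masque_parite (parite : Int) (nb : Int) : Option Int :=
  let masque : Int := 0
  if parite = 0 then
    some ((PySem.List.pyRange 0 30 2).foldl (fun m i => m + 2 ^ i.toNat) masque)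
  else if parite = 1 then
    some ((PySem.List.pyRange 1 30 2).foldl (fun m i => m + 2 ^ i.toNat) masque)
  else
    none

-- ===== PORT B =====
-- Port of B: closed-form even mask (4^15-1)/3 shifted by the parity (here parite ∈ {0,1}).
def masque_parite_alt (parite : Int) (nb : Int) : Option Int :=
  if parite ≠ 0 ∧ parite ≠ 1 then none
  else some (((4 ^ 15 - 1) / 3) * 2 ^ parite.toNat)

-- ===== PRECONDITION & SPEC =====
def Spec_masque_parite (parite : Int) (nb : Int) (out : Option Int) : Prop := out = masque_parite_alt parite nb
instance (parite : Int) (nb : Int) (out : Option Int) : Decidable (Spec_masque_parite parite nb out) := by unfold Spec_masque_parite; infer_instance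

-- ===== CLAIM (what is proved, stated in full; the proofs are below) =====
def Claim_equal_masque_parite : Prop := ∀ (parite : Int) (nb : Int), Dom_masque_parite parite nb → Spec_masque_parite parite nb (masque_parite parite nb)

-- ===== LEMMAS AND PROOFS =====

-- ===== VERDICT (by name: the statement is the Claim_ definition above) =====
theorem masque_parite_spec : Claim_equal_masque_parite := by
  intro parite nb _
  unfold Spec_masque_parite masque_parite masque_parite_alt
  by_cases h0 : parite = 0
  · subst h0; decide
  · by_cases h1 : parite = 1
    · subst h1; decide
    · simp [h0, h1]
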